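-- pv_equiv track=rewrite | github.com/srivastava-raj/2024-B-Training | 2000290120083/Binary Search/02. Split Array Largest Sum.py | splitArray
-- ===== SOURCE A (Python) =====
-- from typing import List
--
-- def splitArray(nums: List[int], m: int) -> int:
--
--     l = max(nums);  r = sum(nums);  ans = -1
--
--     if len(nums) < m: return -1
--     def isValid(nums, m, mid):
--         currSum = 0
--         countOfSubarrays = 1
--
--         for val in nums:
--             currSum += val
--             if currSum > mid:
--                 countOfSubarrays += 1
--                 currSum = val
--
--         if countOfSubarrays > m: return False
--         else: return True
--
--
--     while l <= r:
--         mid = (r+l) // 2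
--         if isValid(nums, m, mid):
--             ans = mid
--             r = mid - 1
--         else:
--             l = mid + 1
--
--     return ans
-- ===== SOURCE B (Python) =====
-- def splitArray(nums, m):
--     hi = max(nums)
--     if len(nums) < m:
--         return -1
--     prefix = []
--     total = 0
--     for v in nums:
--         total += v
--         prefix.append(total)
--
--     def fits(mid):
--         cuts = 1
--         base = 0
--         for v, p in zip(nums, prefix):
--             if p - base > mid:
--                 cuts += 1
--                 base = p - v
--         return cuts <= m
--
--     def search(l, r):
--         if l > r:
--             return None
--         mid = (l + r) // 2
--         if fits(mid):
--             left = search(l, mid - 1)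
--             return mid if left is None else left
--         return search(mid + 1, r)
--
--     res = search(hi, total)
--     return -1 if res is None else res
-- ===== Notes on version B (the rewrite author's own statement) =====
-- stated objective: alternative
-- what changed: A's iterative binary search with a mutable 'ans' and a running-sum/reset feasibility scan is replaced by a recursive search that returns None/the leftmost accepted midpoint, with feasibility checked against a precomputed prefix-sum list zipped with the elements (cut when prefix[i]-base exceeds mid).
import Mathlib
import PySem

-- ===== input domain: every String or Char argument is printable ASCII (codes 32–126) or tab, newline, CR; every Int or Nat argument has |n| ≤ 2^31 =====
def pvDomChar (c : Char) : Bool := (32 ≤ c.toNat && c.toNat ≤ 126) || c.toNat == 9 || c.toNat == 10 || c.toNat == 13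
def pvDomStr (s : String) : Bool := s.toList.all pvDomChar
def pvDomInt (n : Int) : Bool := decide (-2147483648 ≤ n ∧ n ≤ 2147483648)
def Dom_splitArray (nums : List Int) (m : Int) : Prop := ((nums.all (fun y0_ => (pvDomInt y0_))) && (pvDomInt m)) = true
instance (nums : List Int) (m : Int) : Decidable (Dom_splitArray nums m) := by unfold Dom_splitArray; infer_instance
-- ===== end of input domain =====

-- B replaces A's iterative binary search with a mutable 'ans' by a recursive search
-- returning Option, and A's running-sum/reset feasibility scan by a check against a
-- precomputed prefix-sum list (objective: alternative decomposition, same cost).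
-- Both loops are written with an explicit Nat fuel = interval length, a totality
-- guard only: with the initial fuel it is never exhausted (the interval shrinks
-- strictly each step), so each port computes exactly what its Python computes.

-- ===== PORT A =====
def isValidA (nums : List Int) (m mid : Int) : Bool :=
  let st := nums.foldl (fun (p : Int × Int) val =>
    let currSum := p.1 + val
    if currSum > mid then (val, p.2 + 1) else (currSum, p.2)) ((0 : Int), (1 : Int))
  decide (st.2 ≤ m)

def loopA (nums : List Int) (m : Int) : Nat → Int → Int → Int → Int
  | 0, _, _, ans => ans
  | fuel + 1, l, r, ans =>
    if l ≤ r then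
      let mid := PySem.Int.floordiv (r + l) 2
      if isValidA nums m mid then loopA nums m fuel l (mid - 1) mid
      else loopA nums m fuel (mid + 1) r ans
    else ans

def splitArray (nums : List Int) (m : Int) : Int :=
  -- max(nums) raises ValueError on []; Pre_ excludes that input, .getD 0 is unreachable under Pre_
  let l := (PySem.List.max? nums (fun x => x)).getD 0
  let r := nums.sum
  if (nums.length : Int) < m then -1
  else loopA nums m (r + 1 - l).toNat l r (-1)

-- ===== PORT B =====
def prefixB (nums : List Int) : List Int × Int :=
  nums.foldl (fun (s : List Int × Int) v => (s.1 ++ [s.2 + v], s.2 + v)) (([] : List Int), (0 : Int))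

def fitsB (nums pre : List Int) (m mid : Int) : Bool :=
  let st := (nums.zip pre).foldl (fun (s : Int × Int) vp =>
    if vp.2 - s.2 > mid then (s.1 + 1, vp.2 - vp.1) else s) ((1 : Int), (0 : Int))
  decide (st.1 ≤ m)

def searchB (nums pre : List Int) (m : Int) : Nat → Int → Int → Option Int
  | 0, _, _ => none
  | fuel + 1, l, r =>
    if l > r then none
    else
      let mid := PySem.Int.floordiv (l + r) 2
      if fitsB nums pre m mid then
        match searchB nums pre m fuel l (mid - 1) with
        | none => some mid
        | some x => some x
      else searchB nums pre m fuel (mid + 1) r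

def splitArray_alt (nums : List Int) (m : Int) : Int :=
  -- max(nums) raises ValueError on []; Pre_ excludes that input
  let hi := (PySem.List.max? nums (fun x => x)).getD 0
  if (nums.length : Int) < m then -1
  else
    let pr := prefixB nums
    match searchB nums pr.1 m (pr.2 + 1 - hi).toNat hi pr.2 with
    | none => -1
    | some x => x

-- ===== PRECONDITION & SPEC =====
-- Pre_ excludes only the empty list, on which Python A (and B) raise ValueError at max(nums).
def Pre_splitArray (nums : List Int) (m : Int) : Prop := nums ≠ []
instance (nums : List Int) (m : Int) : Decidable (Pre_splitArray nums m) := by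
  unfold Pre_splitArray; infer_instance

def pvWitness_splitArray : List Int × Int := ([7, 2, 5, 10, 8], 2)

def Spec_splitArray (nums : List Int) (m : Int) (out : Int) : Prop := out = splitArray_alt nums m
instance (nums : List Int) (m : Int) (out : Int) : Decidable (Spec_splitArray nums m out) := by unfold Spec_splitArray; infer_instance

-- ===== CLAIM (what is proved, stated in full; the proofs are below) =====
def Claim_equal_splitArray : Prop := ∀ (nums : List Int) (m : Int), Dom_splitArray nums m → Pre_splitArray nums m → Spec_splitArray nums m (splitArray nums m)

-- ===== LEMMAS AND PROOFS =====

/-- Prefix sums starting from running total `t` (what B's first loop builds). -/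
def accum (t : Int) : List Int → List Int
  | [] => []
  | v :: xs => (t + v) :: accum (t + v) xs

theorem prefixB_fold (nums : List Int) : ∀ (t : Int) (acc : List Int),
    nums.foldl (fun (s : List Int × Int) v => (s.1 ++ [s.2 + v], s.2 + v)) (acc, t)
      = (acc ++ accum t nums, t + nums.sum) := by
  induction nums with
  | nil => intro t acc; simp [accum]
  | cons v xs ih =>
      intro t acc
      simp only [List.foldl_cons, accum, ih (t + v) (acc ++ [t + v]), List.sum_cons]
      rw [Prod.mk.injEq]
      exact ⟨by simp, by ring⟩

theorem prefixB_eq (nums : List Int) : prefixB nums = (accum 0 nums, nums.sum) := by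
  unfold prefixB
  rw [prefixB_fold nums 0 []]
  simp

/-- B's zip-fold state (cuts, base) corresponds to A's fold state (currSum, count). -/
theorem fold_corr (mid : Int) : ∀ (xs : List Int) (t b c : Int),
    (xs.zip (accum t xs)).foldl (fun (s : Int × Int) vp =>
        if vp.2 - s.2 > mid then (s.1 + 1, vp.2 - vp.1) else s) (c, b)
      = ((xs.foldl (fun (p : Int × Int) val =>
            let currSum := p.1 + val
            if currSum > mid then (val, p.2 + 1) else (currSum, p.2)) (t - b, c)).2,
         t + xs.sum - (xs.foldl (fun (p : Int × Int) val =>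
            let currSum := p.1 + val
            if currSum > mid then (val, p.2 + 1) else (currSum, p.2)) (t - b, c)).1) := by
  intro xs
  induction xs with
  | nil => intro t b c; simp
  | cons v xs ih =>
      intro t b c
      simp only [accum, List.zip_cons_cons, List.foldl_cons, List.sum_cons]
      by_cases h : t - b + v > mid
      · rw [if_pos (show t + v - b > mid by omega), if_pos h]
        have hih := ih (t + v) t (c + 1)
        rw [show t + v - t = v from by ring] at hih
        rw [show t + v - v = t from by ring, hih, Prod.mk.injEq]
        exact ⟨rfl, by ring⟩
      · rw [if_neg (show ¬ t + v - b > mid by omega), if_neg h]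
        have hih := ih (t + v) b c
        rw [show t + v - b = t - b + v from by ring] at hih
        rw [hih, Prod.mk.injEq]
        exact ⟨rfl, by ring⟩

theorem fits_eq (nums : List Int) (m mid : Int) :
    fitsB nums (accum 0 nums) m mid = isValidA nums m mid := by
  unfold fitsB isValidA
  rw [fold_corr mid nums 0 0 1]
  simp

/-- A's iterative binary search with answer accumulator equals B's recursive
    option-returning search, fuel for fuel, given the feasibility checks agree. -/
theorem loop_eq_search (nums pre : List Int) (m : Int)
    (hfit : ∀ mid, fitsB nums pre m mid = isValidA nums m mid) :
    ∀ (fuel : Nat) (l r ans : Int),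
      loopA nums m fuel l r ans = (searchB nums pre m fuel l r).getD ans := by
  intro fuel
  induction fuel with
  | zero => intro l r ans; simp [loopA, searchB]
  | succ k ih =>
      intro l r ans
      by_cases hlr : l ≤ r
      · rw [loopA, searchB]
        simp only [hlr, if_pos, show ¬ l > r by omega, if_neg, not_false_iff]
        rw [Int.add_comm r l, ← hfit]
        by_cases hv : fitsB nums pre m (PySem.Int.floordiv (l + r) 2)
        · simp only [hv, if_pos]
          rw [ih l (PySem.Int.floordiv (l + r) 2 - 1) (PySem.Int.floordiv (l + r) 2)]
          cases searchB nums pre m k l (PySem.Int.floordiv (l + r) 2 - 1) <;> simp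
        · simp only [hv, Bool.false_eq_true, if_neg, not_false_iff]
          exact ih (PySem.Int.floordiv (l + r) 2 + 1) r ans
      · rw [loopA, searchB]
        simp [hlr, show l > r by omega]

-- ===== VERDICT (by name: the statement is the Claim_ definition above) =====
theorem splitArray_spec : Claim_equal_splitArray := by
  intro nums m _hdom _hpre
  unfold Spec_splitArray splitArray splitArray_alt
  by_cases hlen : (nums.length : Int) < m
  · simp [hlen]
  · simp only [hlen, if_neg, not_false_iff]
    rw [prefixB_eq nums]
    exact (loop_eq_search nums (accum 0 nums) m (fun mid => fits_eq nums m mid)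
      (nums.sum + 1 - (PySem.List.max? nums (fun x => x)).getD 0).toNat
      ((PySem.List.max? nums (fun x => x)).getD 0) nums.sum (-1)).symm ▸ by
        cases searchB nums (accum 0 nums) m
          (nums.sum + 1 - (PySem.List.max? nums (fun x => x)).getD 0).toNat
          ((PySem.List.max? nums (fun x => x)).getD 0) nums.sum <;> simp
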